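-- pv_equiv track=rewrite | github.com/abdullahalhoothy/yc-cofounder | format_text.py | format_text_with_line_breaks
-- ===== SOURCE A (Python) =====
-- def format_text_with_line_breaks(text, words_per_line=15):
--     """
--     Format text by adding line breaks after approximately the specified number of words,
--     while preserving the structure of the document (keeping separators and headers intact)
--
--     Args:
--         text (str): Input text to format
--         words_per_line (int): Target number of words per line
--
--     Returns:
--         str: Formatted text with line breaks
--     """
--     lines = text.split('\n')
--     formatted_lines = []
--
--     for line in lines:
--         # Skip empty lines and separator lines
--         if not line.strip() or line.strip().startswith('===='):
--             formatted_lines.append(line)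
--             continue
--
--         # Check if this is a header line (Date:, Name:, URL:, Reason:)
--         if any(line.startswith(header) for header in ['Date:', 'Name:', 'URL:', 'Reason:']):
--             # Split the content after the header
--             if ':' in line:
--                 header_part, content_part = line.split(':', 1)
--                 content_part = content_part.strip()
--
--                 if content_part:
--                     # Break up the content part into lines
--                     words = content_part.split()
--                     content_lines = []
--                     current_line = []
--
--                     for word in words:
--                         current_line.append(word)
--                         if len(current_line) >= words_per_line:
--                             content_lines.append(' '.join(current_line))
--                             current_line = []
--
--                     # Add any remaining words
--                     if current_line:
--                         content_lines.append(' '.join(current_line))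
--
--                     # Add the header with the first line of content
--                     if content_lines:
--                         formatted_lines.append(f"{header_part}: {content_lines[0]}")
--                         # Add remaining content lines with proper indentation
--                         for content_line in content_lines[1:]:
--                             formatted_lines.append(content_line)
--                     else:
--                         formatted_lines.append(line)
--                 else:
--                     formatted_lines.append(line)
--             else:
--                 formatted_lines.append(line)
--         else:
--             # For non-header lines, break them up if they're too long
--             words = line.split()
--             if len(words) > words_per_line:
--                 current_line = []
--                 for word in words:
--                     current_line.append(word)
--                     if len(current_line) >= words_per_line:
--                         formatted_lines.append(' '.join(current_line))
--                         current_line = []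
--
--                 if current_line:
--                     formatted_lines.append(' '.join(current_line))
--             else:
--                 formatted_lines.append(line)
--
--     return '\n'.join(formatted_lines)
-- ===== SOURCE B (Python) =====
-- def format_text_with_line_breaks(text, words_per_line=15):
--     """Same formatting, but word-chunking done by a take/drop slicing helper
--     instead of an accumulator-and-flush counter loop."""
--     k = max(1, words_per_line)
--
--     def chunk(ws):
--         out = []
--         while ws:
--             out.append(' '.join(ws[:k]))
--             ws = ws[k:]
--         return out
--
--     formatted = []
--     for line in text.split('\n'):
--         stripped = line.strip()
--         if not stripped or stripped.startswith('===='):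
--             formatted.append(line)
--         elif line.startswith(('Date:', 'Name:', 'URL:', 'Reason:')):
--             header, content = line.split(':', 1)
--             ws = content.strip().split()
--             if ws:
--                 cs = chunk(ws)
--                 formatted.append(header + ': ' + cs[0])
--                 formatted.extend(cs[1:])
--             else:
--                 formatted.append(line)
--         else:
--             ws = line.split()
--             if len(ws) > words_per_line:
--                 formatted.extend(chunk(ws))
--             else:
--                 formatted.append(line)
--     return '\n'.join(formatted)
-- ===== Notes on version B (the rewrite author's own statement) =====
-- stated objective: simpler
-- what changed: Replaces A's two duplicated accumulate-and-flush word-chunking loops (current_line buffer flushed whenever it reaches words_per_line, plus a trailing flush) by one shared chunk helper that repeatedly slices off the next k words with k = max(1, words_per_line), and drops A's redundant membership test for a colon in the header line (the header prefix guarantees it).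
import Mathlib
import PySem

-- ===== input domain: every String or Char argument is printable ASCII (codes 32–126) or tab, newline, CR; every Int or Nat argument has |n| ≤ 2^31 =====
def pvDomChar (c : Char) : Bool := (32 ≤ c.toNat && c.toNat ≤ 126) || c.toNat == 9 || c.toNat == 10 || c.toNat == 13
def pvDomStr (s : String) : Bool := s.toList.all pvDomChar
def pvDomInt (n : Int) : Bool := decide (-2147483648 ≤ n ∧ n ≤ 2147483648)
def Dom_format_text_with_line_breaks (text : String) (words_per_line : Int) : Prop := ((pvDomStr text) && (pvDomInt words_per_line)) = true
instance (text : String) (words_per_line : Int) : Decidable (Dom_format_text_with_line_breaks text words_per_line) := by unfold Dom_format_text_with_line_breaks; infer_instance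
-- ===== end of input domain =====

-- B replaces A's two duplicated accumulate-and-flush word-chunking loops by one shared
-- take/drop slicing chunk helper (objective: simpler); the return value is proved equal.

-- ===== PORT A =====

-- A's inner loop body (identical in A's header branch and its else branch):
--   current_line.append(word); if len(current_line) >= words_per_line: flush
-- state = (content_lines so far, current_line)
def pvStepA (wpl : Int) (st : List String × List String) (w : String) : List String × List String :=
  let cur := st.2 ++ [w]
  if (cur.length : Int) ≥ wpl then (st.1 ++ [PySem.Str.join " " cur], []) else (st.1, cur)

-- the lines A appends to formatted_lines for one input line of text.split('\n')
def pvLineA (wpl : Int) (line : String) : List String :=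
  let stripped := PySem.Str.strip line
  if stripped = "" ∨ PySem.Str.startswith stripped "====" = true then [line]
  else if PySem.Str.startswith line "Date:" = true ∨ PySem.Str.startswith line "Name:" = true
       ∨ PySem.Str.startswith line "URL:" = true ∨ PySem.Str.startswith line "Reason:" = true then
    if PySem.Str.isIn ":" line = true then
      match PySem.Str.splitMax? line ":" 1 with
      | some [header_part, content_part0] =>
        let content_part := PySem.Str.strip content_part0
        if content_part ≠ "" then
          let words := PySem.Str.split₀ content_part
          let r := words.foldl (pvStepA wpl) ([], [])
          let content_lines := if r.2 ≠ [] then r.1 ++ [PySem.Str.join " " r.2] else r.1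
          match content_lines with
          | first :: rest => (header_part ++ ": " ++ first) :: rest
          | [] => [line]
        else [line]
      -- unreachable: ':' in line means split(':',1) yields exactly two parts
      -- (Python's 2-tuple unpack would raise on any other shape)
      | _ => [line]
    else [line]
  else
    let words := PySem.Str.split₀ line
    if (words.length : Int) > wpl then
      let r := words.foldl (pvStepA wpl) ([], [])
      if r.2 ≠ [] then r.1 ++ [PySem.Str.join " " r.2] else r.1
    else [line]

def format_text_with_line_breaks (text : String) (words_per_line : Int) : String :=
  -- text.split('\n'): the separator is nonempty, so split? is always some
  let lines := (PySem.Str.split? text "\n").getD []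
  PySem.Str.join "\n" (lines.foldl (fun acc l => acc ++ pvLineA words_per_line l) [])

-- ===== PORT B =====

-- Source B's `while ws: out.append(' '.join(ws[:k])); ws = ws[k:]`, written with km = k - 1
-- (k = max(1, words_per_line) ≥ 1, so on a nonempty ws, ws[:k] = w :: ws.take km and
--  ws[k:] = ws.drop km — cf. PySem.List.slice_to / slice_from; .toNat is exact since k ≥ 1)
def pvChunkB (km : Nat) : List String → List String
  | [] => []
  | w :: ws => PySem.Str.join " " (w :: ws.take km) :: pvChunkB km (ws.drop km)
termination_by ws => ws.length
decreasing_by simp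

-- the lines Source B appends for one input line (km is computed once by the caller)
def pvLineB (wpl : Int) (km : Nat) (line : String) : List String :=
  let stripped := PySem.Str.strip line
  if stripped = "" ∨ PySem.Str.startswith stripped "====" = true then [line]
  else if PySem.Str.startswith line "Date:" = true ∨ PySem.Str.startswith line "Name:" = true
       ∨ PySem.Str.startswith line "URL:" = true ∨ PySem.Str.startswith line "Reason:" = true then
    match PySem.Str.splitMax? line ":" 1 with
    | some [header, content] =>
      let ws := PySem.Str.split₀ (PySem.Str.strip content)
      if ws ≠ [] then
        let cs := pvChunkB km ws
        (header ++ ": " ++ PySem.List.pyGetD cs 0 "") :: PySem.List.slice cs (some 1) none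
      else [line]
    -- unreachable: the header prefix contains ':', so split(':',1) yields two parts
    -- (Python's 2-tuple unpack would raise otherwise)
    | _ => [line]
  else
    let ws := PySem.Str.split₀ line
    if (ws.length : Int) > wpl then pvChunkB km ws else [line]

def format_text_with_line_breaks_alt (text : String) (words_per_line : Int) : String :=
  let km := (max 1 words_per_line - 1).toNat  -- k = max(1, words_per_line), km = k - 1
  let lines := (PySem.Str.split? text "\n").getD []
  PySem.Str.join "\n" (lines.foldl (fun acc l => acc ++ pvLineB words_per_line km l) [])

-- ===== PRECONDITION & SPEC =====
def Spec_format_text_with_line_breaks (text : String) (words_per_line : Int) (out : String) : Prop := out = format_text_with_line_breaks_alt text words_per_line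
instance (text : String) (words_per_line : Int) (out : String) : Decidable (Spec_format_text_with_line_breaks text words_per_line out) := by unfold Spec_format_text_with_line_breaks; infer_instance

-- ===== CLAIM (what is proved, stated in full; the proofs are below) =====
def Claim_equal_format_text_with_line_breaks : Prop := ∀ (text : String) (words_per_line : Int), Dom_format_text_with_line_breaks text words_per_line → Spec_format_text_with_line_breaks text words_per_line (format_text_with_line_breaks text words_per_line)

-- ===== LEMMAS AND PROOFS =====

theorem pv_cond_iff (wpl : Int) (km : Nat) (hk : km = (max 1 wpl - 1).toNat) (l : Nat) (hl : 1 ≤ l) :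
    (wpl ≤ (l : Int)) ↔ km + 1 ≤ l := by
  rcases le_total wpl 1 with h | h
  · simp [max_eq_left h] at hk; omega
  · simp [max_eq_right h] at hk; omega

theorem pv_foldA_short (wpl : Int) (km : Nat) (hk : km = (max 1 wpl - 1).toNat) :
    ∀ (pre : List String) (acc cur : List String), cur.length + pre.length < km + 1 →
      pre.foldl (pvStepA wpl) (acc, cur) = (acc, cur ++ pre) := by
  intro pre
  induction pre with
  | nil => intro acc cur _; simp
  | cons p ps ih =>
    intro acc cur h
    simp only [List.length_cons] at h
    have hc : ¬ (wpl ≤ ((cur ++ [p]).length : Int)) := by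
      rw [pv_cond_iff wpl km hk _ (by simp)]
      simp only [List.length_append, List.length_cons, List.length_nil]
      omega
    simp only [List.foldl_cons, pvStepA]
    rw [if_neg (by simpa using hc)]
    rw [ih acc (cur ++ [p]) (by simp only [List.length_append, List.length_cons, List.length_nil]; omega)]
    simp

theorem pv_foldA_flush (wpl : Int) (km : Nat) (hk : km = (max 1 wpl - 1).toNat) :
    ∀ (pre : List String) (acc cur : List String), cur.length < km + 1 →
      cur.length + pre.length = km + 1 →
      pre.foldl (pvStepA wpl) (acc, cur) = (acc ++ [PySem.Str.join " " (cur ++ pre)], []) := by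
  intro pre
  induction pre with
  | nil => intro acc cur h1 h2; simp only [List.length_nil] at h2; omega
  | cons p ps ih =>
    intro acc cur h1 h2
    simp only [List.length_cons] at h2
    simp only [List.foldl_cons, pvStepA]
    by_cases hps : ps = []
    · subst hps
      simp only [List.length_nil] at h2
      have hcc : wpl ≤ ((cur ++ [p]).length : Int) := by
        rw [pv_cond_iff wpl km hk _ (by simp)]
        simp only [List.length_append, List.length_cons, List.length_nil]
        omega
      rw [if_pos (by simpa using hcc)]
      simp
    · have hps1 : 1 ≤ ps.length := List.length_pos_iff.mpr hps
      have hc : ¬ (wpl ≤ ((cur ++ [p]).length : Int)) := by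
        rw [pv_cond_iff wpl km hk _ (by simp)]
        simp only [List.length_append, List.length_cons, List.length_nil]
        omega
      rw [if_neg (by simpa using hc)]
      rw [ih acc (cur ++ [p]) (by simp only [List.length_append, List.length_cons, List.length_nil]; omega)
            (by simp only [List.length_append, List.length_cons, List.length_nil]; omega)]
      simp

theorem pv_chunk_eq (wpl : Int) (km : Nat) (hk : km = (max 1 wpl - 1).toNat) :
    ∀ (n : Nat) (ws acc : List String), ws.length ≤ n →
      (if (ws.foldl (pvStepA wpl) (acc, [])).2 ≠ []
       then (ws.foldl (pvStepA wpl) (acc, [])).1 ++ [PySem.Str.join " " (ws.foldl (pvStepA wpl) (acc, [])).2]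
       else (ws.foldl (pvStepA wpl) (acc, [])).1) = acc ++ pvChunkB km ws := by
  intro n
  induction n with
  | zero =>
    intro ws acc hle
    have : ws = [] := List.eq_nil_of_length_eq_zero (by omega)
    subst this
    simp [pvChunkB]
  | succ n ih =>
    intro ws acc hle
    match ws with
    | [] => simp [pvChunkB]
    | w :: ws' =>
      by_cases hsh : ws'.length < km
      · have hdrop : ws'.drop km = [] := List.drop_eq_nil_of_le (by omega)
        have htake : ws'.take km = ws' := List.take_of_length_le (by omega)
        rw [show (w :: ws').foldl (pvStepA wpl) (acc, []) = (acc, [] ++ (w :: ws')) from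
          pv_foldA_short wpl km hk (w :: ws') acc [] (by simp; omega)]
        simp [pvChunkB, hdrop, htake]
      · have hsplit : w :: ws' = (w :: ws'.take km) ++ ws'.drop km := by
          simp [List.take_append_drop]
        conv_lhs => rw [hsplit]
        rw [List.foldl_append]
        rw [pv_foldA_flush wpl km hk (w :: ws'.take km) acc [] (by simp)
              (by simp [List.length_take]; omega)]
        have hrec := ih (ws'.drop km) (acc ++ [PySem.Str.join " " ([] ++ (w :: ws'.take km))])
          (by simp at hle ⊢; omega)
        simp only [List.nil_append] at hrec ⊢
        rw [hrec]
        conv_rhs => rw [pvChunkB]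
        simp
theorem pv_split₀_go_mono (l : List Char) :
    ∀ (cur : List Char) (acc : List (List Char)),
      acc.length ≤ (PySem.Chars.split₀.go l cur acc).length := by
  induction l with
  | nil =>
    intro cur acc
    rw [PySem.Chars.split₀.go.eq_def]
    by_cases h : cur.isEmpty <;> simp [h]
  | cons c rest ih =>
    intro cur acc
    rw [PySem.Chars.split₀.go.eq_def]
    by_cases hs : PySem.Chars.isspace c <;> by_cases hc : cur.isEmpty <;>
      simp only [hs, hc, ite_true]
    · exact ih _ _
    · exact le_trans (by simp) (ih [] (cur.reverse :: acc))
    · exact ih _ _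
    · exact ih _ _

theorem pv_split₀_go_ne_nil (l : List Char) :
    ∀ (cur : List Char) (acc : List (List Char)),
      (¬ l.all PySem.Chars.isspace ∨ cur ≠ []) →
      acc.length < (PySem.Chars.split₀.go l cur acc).length := by
  induction l with
  | nil =>
    intro cur acc h
    have hc : cur ≠ [] := by simpa using h
    rw [PySem.Chars.split₀.go.eq_def]
    simp [List.isEmpty_iff, hc]
  | cons c rest ih =>
    intro cur acc h
    rw [PySem.Chars.split₀.go.eq_def]
    by_cases hs : PySem.Chars.isspace c
    · simp only [hs, ite_true]
      by_cases hc : cur.isEmpty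
      · simp only [hc, ite_true]
        apply ih
        left
        simp only [List.all_cons, hs, Bool.true_and] at h
        simp only [List.isEmpty_iff] at hc
        simp [hc] at h
        simpa using h
      · rw [if_neg hc]
        have := pv_split₀_go_mono rest [] (cur.reverse :: acc)
        simp only [List.length_cons] at this
        omega
    · simp only [hs]
      exact ih _ _ (Or.inr (by simp))

theorem pv_split₀_eq_nil_iff (l : List Char) :
    PySem.Chars.split₀ l = [] ↔ l.all PySem.Chars.isspace := by
  constructor
  · intro h
    by_contra hna
    have := pv_split₀_go_ne_nil l [] [] (Or.inl (by simpa using hna))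
    rw [show PySem.Chars.split₀.go l [] [] = PySem.Chars.split₀ l from rfl, h] at this
    simp at this
  · intro h
    have : ∀ (m : List Char) (acc : List (List Char)), m.all PySem.Chars.isspace →
        PySem.Chars.split₀.go m [] acc = acc.reverse := by
      intro m
      induction m with
      | nil => intro acc _; rw [PySem.Chars.split₀.go.eq_def]; simp
      | cons c rest ihm =>
        intro acc hm
        simp only [List.all_cons, Bool.and_eq_true] at hm
        rw [PySem.Chars.split₀.go.eq_def]
        simp only [hm.1, ite_true, List.isEmpty_nil, ite_true]
        exact ihm acc hm.2
    simpa [PySem.Chars.split₀] using this l [] h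

-- a stripped list whose characters are all whitespace is empty
theorem pv_all_space_of_strip (L : List Char) (h : (PySem.Chars.strip L).all PySem.Chars.isspace) :
    PySem.Chars.strip L = [] := by
  by_contra hne
  rcases hs : PySem.Chars.strip L with _ | ⟨y, ys⟩
  · exact hne hs
  · -- strip L is a prefix of lstrip L, so they share the head y, which dropWhile made non-space
    have hpre : PySem.Chars.strip L <+: PySem.Chars.lstrip L := by
      rw [PySem.Chars.strip, PySem.Chars.rstrip]
      have hsfx := List.reverse_prefix.mpr
        (List.dropWhile_suffix (l := (PySem.Chars.lstrip L).reverse) PySem.Chars.isspace)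
      simpa using hsfx
    rw [hs] at hpre
    rcases hpre with ⟨t, ht⟩
    have hd' : List.dropWhile PySem.Chars.isspace L = y :: (ys ++ t) := by
      rw [show List.dropWhile PySem.Chars.isspace L = PySem.Chars.lstrip L from rfl, ← ht]
      simp
    have hw : List.dropWhile PySem.Chars.isspace L ≠ [] := by rw [hd']; simp
    have hhead := List.head_dropWhile_not PySem.Chars.isspace hw
    simp only [hd', List.head_cons] at hhead
    rw [hs] at h
    simp only [List.all_cons, Bool.and_eq_true] at h
    rw [h.1] at hhead
    simp at hhead

theorem pv_guard_iff (c : String) :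
    (PySem.Str.split₀ (PySem.Str.strip c) ≠ []) ↔ (PySem.Str.strip c ≠ "") := by
  rw [not_iff_not]
  constructor
  · intro h
    have h2 : PySem.Chars.split₀ (PySem.Str.strip c).toList = [] := by
      rw [← PySem.Str.split₀_map_toList, h]; rfl
    rw [pv_split₀_eq_nil_iff] at h2
    rw [PySem.Str.toList_strip] at h2
    have h3 : PySem.Chars.strip c.toList = [] := pv_all_space_of_strip _ h2
    have : (PySem.Str.strip c).toList = ("" : String).toList := by
      rw [PySem.Str.toList_strip, h3]; rfl
    exact String.toList_injective this
  · intro h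
    have : (PySem.Str.strip c).toList = [] := by rw [h]; rfl
    have h2 : PySem.Chars.split₀ (PySem.Str.strip c).toList = [] := by rw [this]; decide
    have := PySem.Str.split₀_map_toList (PySem.Str.strip c)
    rw [h2] at this
    exact List.map_eq_nil_iff.mp this
-- a line starting with one of the headers contains ':'
theorem pv_header_has_colon (line : String) (p : String)
    (hp : (':' : Char) ∈ p.toList) (h : PySem.Str.startswith line p = true) :
    PySem.Str.isIn ":" line = true := by
  rw [PySem.Str.isIn_iff_infix]
  rw [PySem.Str.startswith_eq, PySem.Chars.startswith_iff] at h
  have hinf : (":" : String).toList <:+: p.toList := by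
    rcases List.mem_iff_append.mp hp with ⟨s, t, hst⟩
    exact ⟨s, t, by simpa using hst.symm⟩
  exact hinf.trans h.isInfix

theorem pv_line_eq (wpl : Int) (km : Nat) (hk : km = (max 1 wpl - 1).toNat) (line : String) :
    pvLineA wpl line = pvLineB wpl km line := by
  unfold pvLineA pvLineB
  by_cases h1 : PySem.Str.strip line = "" ∨ PySem.Str.startswith (PySem.Str.strip line) "====" = true
  · simp only [h1, if_pos]
  · rw [if_neg h1, if_neg h1]
    by_cases h2 : PySem.Str.startswith line "Date:" = true ∨ PySem.Str.startswith line "Name:" = true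
        ∨ PySem.Str.startswith line "URL:" = true ∨ PySem.Str.startswith line "Reason:" = true
    · rw [if_pos h2, if_pos h2]
      have hcolon : PySem.Str.isIn ":" line = true := by
        rcases h2 with h | h | h | h
        · exact pv_header_has_colon line "Date:" (by decide) h
        · exact pv_header_has_colon line "Name:" (by decide) h
        · exact pv_header_has_colon line "URL:" (by decide) h
        · exact pv_header_has_colon line "Reason:" (by decide) h
      rw [if_pos hcolon]
      rcases hsp : PySem.Str.splitMax? line ":" 1 with _ | parts
      · rfl
      · match parts with
        | [] => rfl
        | [a] => rfl
        | a :: b :: c :: rest => rfl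
        | [hp, cp] =>
          simp only []
          by_cases hg : PySem.Str.strip cp ≠ ""
          · rw [if_pos hg, if_pos ((pv_guard_iff cp).mpr hg)]
            have hws : PySem.Str.split₀ (PySem.Str.strip cp) ≠ [] := (pv_guard_iff cp).mpr hg
            rcases hws' : PySem.Str.split₀ (PySem.Str.strip cp) with _ | ⟨w, ws'⟩
            · exact absurd hws' hws
            · have hch := pv_chunk_eq wpl km hk (w :: ws').length (w :: ws') [] le_rfl
              simp only [List.nil_append] at hch
              rw [hch]
              rw [show pvChunkB km (w :: ws')
                    = PySem.Str.join " " (w :: ws'.take km) :: pvChunkB km (ws'.drop km) from by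
                    rw [pvChunkB]]
              simp only [PySem.List.pyGetD_zero_cons]
              rw [PySem.List.slice_from _ (by norm_num : (0:Int) ≤ 1)]
              simp
          · rw [if_neg hg, if_neg (fun hws => hg ((pv_guard_iff cp).mp hws))]
    · rw [if_neg h2, if_neg h2]
      by_cases h3 : ((PySem.Str.split₀ line).length : Int) > wpl
      · rw [if_pos h3, if_pos h3]
        have := pv_chunk_eq wpl km hk (PySem.Str.split₀ line).length (PySem.Str.split₀ line) [] le_rfl
        simpa using this
      · rw [if_neg h3, if_neg h3]

-- ===== VERDICT (by name: the statement is the Claim_ definition above) =====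
theorem format_text_with_line_breaks_spec : Claim_equal_format_text_with_line_breaks := by
  intro text wpl _
  unfold Spec_format_text_with_line_breaks format_text_with_line_breaks format_text_with_line_breaks_alt
  have hfun : (fun (acc : List String) l => acc ++ pvLineA wpl l)
      = (fun (acc : List String) l => acc ++ pvLineB wpl ((max 1 wpl - 1).toNat) l) := by
    funext acc l
    rw [pv_line_eq wpl _ rfl l]
  simp only [hfun]
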